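-- pv_equiv track=rewrite | github.com/k-young-passionate/Baekjoon | python_version/p14890.py | check
-- ===== SOURCE A (Python) =====
-- def roadcheck(n, l, road): # checks a road valid or not, N
--     ramp = []
--     flag = 0
--     now = 0
--     ramp.append(0)
--
--     for i in range(len(road)-1):  # left to right traverse
--         r = 0
--         if flag == 0:  # normal cases
--             if road[i] == road[i+1] + 1:  # starts to add ramps
--                 flag = 1
--                 now = road[i+1]
--             elif road[i] > road[i+1] + 1:  # gap more than 2
--                 return False
--
--         if 1 <= flag <= l:  # cases adding ramps
--             if road[i+1] == now:  # checks whether it is valid spaces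
--                 if flag == l:  # end of the ramp
--                     flag = 0
--                 else:  # middle of the ramp
--                     flag += 1
--                 r = 1
--             else:  # invalid space
--                 return False
--         ramp.append(r)
--
--     if flag > 0:  # handle uncompleted finish
--         return False
--
--     flag = 0
--     for i in range(len(road)-1, 0, -1):  # right to left traverse
--         r = 0
--         if flag == 0:  # normal cases
--             if road[i] == road[i - 1] + 1:  # starts to add ramps
--                 flag = 1
--                 now = road[i-1]
--             elif road[i] > road[i - 1] + 1:  # gap more than 2
--                 return False
--         if 1 <= flag <= l:  # cases adding ramps
--             if road[i - 1] == now:  # checks whether it is valid spaces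
--                 r = 1
--                 if flag == l:  # end of the ramp
--                     flag = 0
--                 else:  # middle of the ramp
--                     flag += 1
--             else:  # invalid space
--                 return False
--         ramp[i-1] += r
--
--     if flag > 0:  # handle uncompleted finish
--         return False
--
--     for i in ramp:  # checks whether there is any duplicated ramps on a same place
--         if i > 1:
--             return False
--
--     return True
--
-- def check(n, l, roads):  # checks road one by one and counts the number of valid roads, N
--     result = 0
--     for i in range(n):  # horizontal check
--         road = roads[i].copy()
--         if roadcheck(n, l, road):
--             result += 1
--
--     for i in range(n):  # vertical check
--         road = []
--         for j in range(n):
--             road.append(roads[j][i])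
--         if roadcheck(n, l, road):
--             result += 1
--     return result
-- ===== SOURCE B (Python) =====
-- def _runs(road):
--     runs = []
--     for h in road:
--         if runs and runs[-1][0] == h:
--             runs[-1] = (h, runs[-1][1] + 1)
--         else:
--             runs.append((h, 1))
--     return runs
--
-- def _roadok(l, road):
--     runs = _runs(road)
--     for k in range(len(runs) - 1):
--         if abs(runs[k][0] - runs[k + 1][0]) != 1:
--             return False
--     for k in range(len(runs)):
--         h, c = runs[k]
--         need = 0
--         if k > 0 and runs[k - 1][0] > h:
--             need += 1
--         if k + 1 < len(runs) and runs[k + 1][0] > h: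
--             need += 1
--         if need * l > c:
--             return False
--     return True
--
-- def check(n, l, roads):
--     total = 0
--     for i in range(n):
--         if _roadok(l, roads[i]):
--             total += 1
--     for i in range(n):
--         if _roadok(l, [roads[j][i] for j in range(n)]):
--             total += 1
--     return total
-- ===== Notes on version B (the rewrite author's own statement) =====
-- stated objective: simpler
-- what changed: Replaces roadcheck's two directional state-machine sweeps plus a shared ramp-marking array and final overlap scan by a run-length decomposition: each road is grouped once into maximal flat runs, and validity is a local per-run check (adjacent run heights differ by exactly 1, and each run needs l cells per higher neighbour, 2l if both neighbours are higher).
-- outside the precondition, e.g. on check(1, 0, [[0, 1], [1, 1]]): A returns 1, B returns 2; on check(2, 1, [[0, 0]]): A raises IndexError, B raises IndexError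
import Mathlib
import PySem

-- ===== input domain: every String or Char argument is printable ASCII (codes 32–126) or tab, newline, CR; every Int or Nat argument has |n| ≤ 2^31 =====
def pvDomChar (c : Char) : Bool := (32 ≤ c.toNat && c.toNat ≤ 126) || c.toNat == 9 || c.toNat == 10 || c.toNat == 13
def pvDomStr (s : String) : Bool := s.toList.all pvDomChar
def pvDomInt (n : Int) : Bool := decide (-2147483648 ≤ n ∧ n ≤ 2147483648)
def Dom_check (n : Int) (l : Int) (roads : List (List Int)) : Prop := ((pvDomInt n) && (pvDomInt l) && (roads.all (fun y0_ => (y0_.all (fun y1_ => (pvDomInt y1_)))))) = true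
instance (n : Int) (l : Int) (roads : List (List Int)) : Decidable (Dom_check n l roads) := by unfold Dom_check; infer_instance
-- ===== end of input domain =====

-- B re-implements BOJ 14890's road check by run-length decomposition with a local per-run
-- ramp rule, replacing A's two directional sweeps + shared ramp array + overlap scan
-- (objective: simpler; equal return values proved for 1 ≤ l).

-- ===== PORT A =====
def pass1 (l : Int) (flag now : Int) : List Int → Option (List Int)
  | a :: b :: rest =>
    let s : Option (Int × Int) :=
      if flag = 0 then
        if a = b + 1 then some (1, b)
        else if a > b + 1 then none
        else some (flag, now)
      else some (flag, now)
    match s with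
    | none => none
    | some (flag1, now1) =>
      if 1 ≤ flag1 ∧ flag1 ≤ l then
        if b = now1 then
          (pass1 l (if flag1 = l then 0 else flag1 + 1) now1 (b :: rest)).map (fun bits => 1 :: bits)
        else none
      else (pass1 l flag1 now1 (b :: rest)).map (fun bits => 0 :: bits)
  | _ => if flag > 0 then none else some []

def pass2 (l : Int) (flag now : Int) : List Int → Option (List Int)
  | a :: b :: rest =>
    let s : Option (Int × Int) :=
      if flag = 0 then
        if a = b + 1 then some (1, b)
        else if a > b + 1 then none
        else some (flag, now)
      else some (flag, now)
    match s with
    | none => none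
    | some (flag1, now1) =>
      if 1 ≤ flag1 ∧ flag1 ≤ l then
        if b = now1 then
          (pass2 l (if flag1 = l then 0 else flag1 + 1) now1 (b :: rest)).map (fun bits => 1 :: bits)
        else none
      else (pass2 l flag1 now1 (b :: rest)).map (fun bits => 0 :: bits)
  | _ => if flag > 0 then none else some []

def roadcheck (n l : Int) (road : List Int) : Bool :=
  match pass1 l 0 0 road with
  | none => false
  | some bits1 =>
    match pass2 l 0 0 road.reverse with
    | none => false
    | some bits2 =>
      (List.zipWith (· + ·) ((0 : Int) :: bits1) (bits2.reverse ++ [0])).all (fun r => decide (r ≤ 1))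

def check (n : Int) (l : Int) (roads : List (List Int)) : Int :=
  let result := (PySem.List.pyRange 0 n 1).foldl (fun acc i =>
      if roadcheck n l ((PySem.List.pyGet? roads i).getD []) then acc + 1 else acc) 0
  (PySem.List.pyRange 0 n 1).foldl (fun acc i =>
      let road := (PySem.List.pyRange 0 n 1).foldl
        (fun rd j => rd ++ [(PySem.List.pyGet? ((PySem.List.pyGet? roads j).getD []) i).getD 0]) []
      if roadcheck n l road then acc + 1 else acc) result

-- ===== PORT B =====
def runsStep (runs : List (Int × Int)) (h : Int) : List (Int × Int) :=
  match runs.getLast? with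
  | some (h0, c) => if h0 = h then runs.dropLast ++ [(h, c + 1)] else runs ++ [(h, 1)]
  | none => [(h, 1)]

def runsOf (road : List Int) : List (Int × Int) := road.foldl runsStep []

def adjOk (runs : List (Int × Int)) : Bool :=
  (runs.zip runs.tail).all (fun p => (p.1.1 - p.2.1).natAbs == 1)

def needOk (l : Int) : Option Int → List (Int × Int) → Bool
  | _, [] => true
  | prev, (h, c) :: rest =>
    let need : Int :=
      (match prev with | some p => if p > h then 1 else 0 | none => 0) +
      (match rest.head? with | some q => if q.1 > h then 1 else 0 | none => 0)
    if need * l > c then false else needOk l (some h) rest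

def roadok (l : Int) (road : List Int) : Bool :=
  let runs := runsOf road
  adjOk runs && needOk l none runs

def check_alt (n : Int) (l : Int) (roads : List (List Int)) : Int :=
  let total := (PySem.List.pyRange 0 n 1).foldl (fun acc i =>
      if roadok l ((PySem.List.pyGet? roads i).getD []) then acc + 1 else acc) 0
  (PySem.List.pyRange 0 n 1).foldl (fun acc i =>
      if roadok l ((PySem.List.pyRange 0 n 1).map
          (fun j => (PySem.List.pyGet? ((PySem.List.pyGet? roads j).getD []) i).getD 0)) then acc + 1 else acc) total

-- ===== PRECONDITION & SPEC =====
-- Pre_check restricts to the problem's natural domain 1 ≤ l (BOJ 14890 guarantees 1 ≤ L ≤ N):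
-- for l ≤ 0 the Python A still returns a value (its sweep rejects every non-flat road), which
-- B's run-based rule does not reproduce; the remaining conjuncts are exactly the grids on which
-- A's roads[i] / roads[j][i] indexing returns instead of raising IndexError.
def Pre_check (n : Int) (l : Int) (roads : List (List Int)) : Prop :=
  1 ≤ l ∧ n ≤ (roads.length : Int) ∧ ∀ row ∈ roads.take n.toNat, n ≤ (row.length : Int)
instance (n : Int) (l : Int) (roads : List (List Int)) : Decidable (Pre_check n l roads) := by
  unfold Pre_check; infer_instance

def pvWitness_check : Int × Int × List (List Int) := (2, 1, [[0, 0], [0, 0]])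

def Spec_check (n : Int) (l : Int) (roads : List (List Int)) (out : Int) : Prop := out = check_alt n l roads
instance (n : Int) (l : Int) (roads : List (List Int)) (out : Int) : Decidable (Spec_check n l roads out) := by
  unfold Spec_check; infer_instance

-- ===== CLAIM (what is proved, stated in full; the proofs are below) =====
def Claim_equal_check : Prop := ∀ (n : Int) (l : Int) (roads : List (List Int)), Dom_check n l roads → Pre_check n l roads → Spec_check n l roads (check n l roads)

-- ===== LEMMAS AND PROOFS =====

-- ===== proof-side run-length machinery =====
def grp (h : Int) (c : Nat) : List Int → List (Int × Nat)
  | [] => [(h, c)]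
  | x :: t => if x = h then grp h (c + 1) t else (h, c) :: grp x 1 t

def rleN : List Int → List (Int × Nat)
  | [] => []
  | x :: t => grp x 1 t

def expandR : List (Int × Nat) → List Int
  | [] => []
  | (h, c) :: rs => List.replicate c h ++ expandR rs

def headFst : List (Int × Nat) → Option Int
  | [] => none
  | (h, _) :: _ => some h

def neChain : List (Int × Nat) → Prop
  | a :: b :: t => a.1 ≠ b.1 ∧ neChain (b :: t)
  | _ => True

def canonR (rs : List (Int × Nat)) : Prop :=
  (∀ p ∈ rs, 1 ≤ p.2) ∧ neChain rs

def castRs (rs : List (Int × Nat)) : List (Int × Int) := rs.map (fun p => (p.1, (p.2 : Int)))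

theorem expand_grp : ∀ (t : List Int) (h : Int) (c : Nat),
    expandR (grp h c t) = List.replicate c h ++ t := by
  intro t
  induction t with
  | nil => intro h c; simp [grp, expandR]
  | cons x t ih =>
    intro h c
    by_cases hx : x = h
    · subst hx
      simp only [grp, eq_self_iff_true, if_true]
      rw [ih, List.replicate_succ']
      simp
    · simp only [grp, if_neg hx, expandR]
      rw [ih]
      simp

theorem expand_rleN (road : List Int) : expandR (rleN road) = road := by
  cases road with
  | nil => rfl
  | cons x t => simp [rleN, expand_grp]

theorem grp_pos : ∀ (t : List Int) (h : Int) (c : Nat), 1 ≤ c →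
    ∀ p ∈ grp h c t, 1 ≤ p.2 := by
  intro t
  induction t with
  | nil => intro h c hc p hp; simp [grp] at hp; subst hp; simpa
  | cons x t ih =>
    intro h c hc p hp
    by_cases hx : x = h
    · subst hx; simp only [grp, if_pos rfl] at hp; exact ih _ _ (by omega) p hp
    · simp only [grp, if_neg hx, List.mem_cons] at hp
      rcases hp with h1 | h2
      · subst h1; simpa
      · exact ih _ _ (by omega) p h2

theorem grp_shape : ∀ (t : List Int) (h : Int) (c : Nat),
    ∃ c' rest, grp h c t = (h, c') :: rest := by
  intro t
  induction t with
  | nil => intro h c; exact ⟨c, [], rfl⟩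
  | cons x t ih =>
    intro h c
    by_cases hx : x = h
    · subst hx; simp only [grp, if_pos rfl]; exact ih _ _
    · exact ⟨c, grp x 1 t, by simp [grp, hx]⟩

theorem grp_chain : ∀ (t : List Int) (h : Int) (c : Nat), neChain (grp h c t) := by
  intro t
  induction t with
  | nil => intro h c; simp [grp, neChain]
  | cons x t ih =>
    intro h c
    by_cases hx : x = h
    · subst hx; simp only [grp, if_pos rfl]; exact ih _ _
    · simp only [grp, if_neg hx]
      obtain ⟨c', rest, hg⟩ := grp_shape t x 1
      rw [hg]
      have := ih x 1
      rw [hg] at this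
      exact ⟨by simpa using (Ne.symm hx), this⟩

theorem canon_rleN (road : List Int) : canonR (rleN road) := by
  cases road with
  | nil => exact ⟨by simp [rleN], by simp [rleN, neChain]⟩
  | cons x t => exact ⟨grp_pos t x 1 (by omega), grp_chain t x 1⟩

theorem foldl_runsStep : ∀ (t : List Int) (acc : List (Int × Int)) (h : Int) (c : Nat),
    List.foldl runsStep (acc ++ [(h, (c : Int))]) t = acc ++ castRs (grp h c t) := by
  intro t
  induction t with
  | nil => intro acc h c; simp [grp, castRs]
  | cons x t ih =>
    intro acc h c
    simp only [List.foldl_cons]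
    have hlast : (acc ++ [(h, (c : Int))]).getLast? = some (h, (c : Int)) := by
      simp [List.getLast?_append]
    by_cases hx : x = h
    · subst hx
      have hstep : runsStep (acc ++ [(x, (c : Int))]) x = acc ++ [(x, ((c + 1 : Nat) : Int))] := by
        simp [runsStep, hlast, List.dropLast_concat]
      rw [hstep, ih]
      simp [grp, castRs]
    · have hstep : runsStep (acc ++ [(h, (c : Int))]) x
          = (acc ++ [(h, (c : Int))]) ++ [(x, ((1 : Nat) : Int))] := by
        simp [runsStep, hlast]
        intro hc; exact absurd hc.symm hx
      rw [hstep, ih]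
      simp [grp, hx, castRs]

theorem runsOf_eq (road : List Int) : runsOf road = castRs (rleN road) := by
  cases road with
  | nil => rfl
  | cons x t =>
    show List.foldl runsStep (runsStep [] x) t = _
    have : runsStep [] x = [] ++ [(x, ((1 : Nat) : Int))] := by simp [runsStep]
    rw [this, foldl_runsStep]
    simp [rleN]

theorem expandR_reverse : ∀ rs : List (Int × Nat), expandR rs.reverse = (expandR rs).reverse := by
  intro rs
  induction rs with
  | nil => rfl
  | cons p rs ih =>
    cases p with
    | mk h c =>
      have hsnoc : ∀ (xs : List (Int × Nat)) (q : Int × Nat),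
          expandR (xs ++ [q]) = expandR xs ++ List.replicate q.2 q.1 := by
        intro xs q
        induction xs with
        | nil => simp [expandR]
        | cons z zs ih2 => cases z; simp [expandR, ih2]
      simp only [List.reverse_cons]
      rw [hsnoc, ih]
      simp [expandR, List.reverse_append, List.reverse_replicate]

theorem neChain_snoc : ∀ (xs : List (Int × Nat)) (y : Int × Nat),
    neChain xs → (∀ q, xs.getLast? = some q → q.1 ≠ y.1) → neChain (xs ++ [y]) := by
  intro xs
  induction xs with
  | nil => intro y _ _; simp [neChain]
  | cons a t ih =>
    intro y hch hlast
    cases t with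
    | nil =>
      refine ⟨hlast a (by simp), ?_⟩
      simp [neChain]
    | cons b t2 =>
      have h1 : a.1 ≠ b.1 := hch.1
      have h2 := ih y hch.2 (fun q hq => hlast q (by simp [hq]))
      exact ⟨h1, h2⟩

theorem getLast?_reverse' {α : Type} (xs : List α) : xs.reverse.getLast? = xs.head? := by
  cases xs with
  | nil => rfl
  | cons a t => simp [List.getLast?_reverse]

theorem neChain_reverse : ∀ rs : List (Int × Nat), neChain rs → neChain rs.reverse := by
  intro rs
  induction rs with
  | nil => intro _; simp [neChain]
  | cons a t ih =>
    intro hch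
    have hcht : neChain t := by
      cases t with
      | nil => simp [neChain]
      | cons b t2 => exact hch.2
    simp only [List.reverse_cons]
    refine neChain_snoc _ _ (ih hcht) ?_
    intro q hq
    rw [getLast?_reverse'] at hq
    cases t with
    | nil => simp at hq
    | cons b t2 =>
      simp at hq
      subst hq
      exact Ne.symm hch.1

theorem canonR_reverse {rs : List (Int × Nat)} (h : canonR rs) : canonR rs.reverse :=
  ⟨fun p hp => h.1 p (by simpa using hp), neChain_reverse rs h.2⟩

theorem foldl_append_map {α β : Type} : ∀ (r : List α) (f : α → β) (init : List β),
    r.foldl (fun rd j => rd ++ [f j]) init = init ++ r.map f := by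
  intro r
  induction r with
  | nil => intro f init; simp
  | cons x t ih => intro f init; simp [ih]


-- ===== A-side block/marks functions over run lists =====
def blkD (l : Int) (prev : Option Int) (h : Int) (c : Nat) : Option (List Int) :=
  match prev with
  | none => some (List.replicate c 0)
  | some p =>
    if p = h + 1 then
      if l ≤ (c : Int) then some (List.replicate l.toNat 1 ++ List.replicate (c - l.toNat) 0)
      else none
    else if p > h + 1 then none
    else some (List.replicate c 0)

def gD (l : Int) (prev : Option Int) : List (Int × Nat) → Option (List Int)
  | [] => some []
  | (h, c) :: rs => (blkD l prev h c).bind (fun b => (gD l (some h) rs).map (fun m => b ++ m))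

def blkU (l : Int) (h : Int) (c : Nat) (next : Option Int) : Option (List Int) :=
  match next with
  | none => some (List.replicate c 0)
  | some q =>
    if q = h + 1 then
      if l ≤ (c : Int) then some (List.replicate (c - l.toNat) 0 ++ List.replicate l.toNat 1)
      else none
    else if q > h + 1 then none
    else some (List.replicate c 0)

def uGo (l : Int) : List (Int × Nat) → Option (List Int)
  | [] => some []
  | (h, c) :: rs => (blkU l h c (headFst rs)).bind (fun b => (uGo l rs).map (fun m => b ++ m))

def combineA (l : Int) (prev : Option Int) (rs : List (Int × Nat)) : Bool :=
  match gD l prev rs, uGo l rs with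
  | some m1, some m2 => (List.zipWith (· + ·) m1 m2).all (fun r => decide (r ≤ 1))
  | _, _ => false

-- ===== pass1 behaviour =====
theorem pass2_eq_pass1 (l : Int) : ∀ (road : List Int) (flag now : Int),
    pass2 l flag now road = pass1 l flag now road := by
  intro road
  induction road with
  | nil => intro flag now; rfl
  | cons a t ih =>
    intro flag now
    cases t with
    | nil => rfl
    | cons b rest =>
      simp only [pass1, pass2]
      rcases hs : (if flag = 0 then
          if a = b + 1 then some ((1 : Int), b)
          else if a > b + 1 then none
          else some (flag, now)
        else some (flag, now)) with _ | ⟨f1, n1⟩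
      · simp
      · simp only []
        split_ifs <;> simp [ih]

theorem flat_pass1 (l now h : Int) : ∀ (c : Nat) (tl : List Int),
    pass1 l 0 now (List.replicate (c + 1) h ++ tl)
      = (pass1 l 0 now (h :: tl)).map (fun bs => List.replicate c 0 ++ bs) := by
  intro c
  induction c with
  | zero =>
    intro tl
    cases h1 : pass1 l 0 now (h :: tl) <;> simp [List.replicate_one, h1]
  | succ c ih =>
    intro tl
    have e1 : List.replicate (c + 1 + 1) h ++ tl = h :: (List.replicate (c + 1) h ++ tl) := by
      simp [List.replicate_succ]
    have e2 : List.replicate (c + 1) h ++ tl = h :: (List.replicate c h ++ tl) := by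
      simp [List.replicate_succ]
    have step : pass1 l 0 now (h :: (h :: (List.replicate c h ++ tl)))
        = (pass1 l 0 now (h :: (List.replicate c h ++ tl))).map (fun bs => 0 :: bs) := by
      simp only [pass1]
      simp [show ¬ ((h : Int) = h + 1) by omega, show ¬ ((h : Int) > h + 1) by omega]
    rw [e1, e2, step, ← e2, ih]
    cases h1 : pass1 l 0 now (h :: tl) <;> simp [h1, List.replicate_succ]

theorem ramp_pass1 (l : Int) (hl : 1 ≤ l) : ∀ (c m : Nat) (h' : Int) (tl : List Int),
    1 ≤ m → (m : Int) ≤ l → (∀ x, tl.head? = some x → x ≠ h') →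
    pass1 l (l - m + 1) h' (List.replicate (c + 1) h' ++ tl)
      = if m ≤ c then (pass1 l 0 h' (h' :: tl)).map
          (fun bs => List.replicate m 1 ++ List.replicate (c - m) 0 ++ bs)
        else none := by
  intro c
  induction c with
  | zero =>
    intro m h' tl hm hml hhd
    rw [if_neg (by omega : ¬ m ≤ 0)]
    cases tl with
    | nil =>
      have e : List.replicate (0 + 1) h' ++ ([] : List Int) = [h'] := by simp
      rw [e]
      simp only [pass1]
      rw [if_pos (by omega : l - (m : Int) + 1 > 0)]
    | cons x t' =>
      have hx : x ≠ h' := hhd x rfl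
      have e : List.replicate (0 + 1) h' ++ (x :: t') = h' :: x :: t' := by simp
      rw [e]
      simp only [pass1]
      simp [show ¬ (l - (m : Int) + 1 = 0) by omega,
        show (1 : Int) ≤ l - (m : Int) + 1 ∧ l - (m : Int) + 1 ≤ l by omega, hx]
  | succ c ih =>
    intro m h' tl hm hml hhd
    have e1 : List.replicate (c + 1 + 1) h' ++ tl = h' :: (List.replicate (c + 1) h' ++ tl) := by
      simp [List.replicate_succ]
    have e2 : List.replicate (c + 1) h' ++ tl = h' :: (List.replicate c h' ++ tl) := by
      simp [List.replicate_succ]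
    have step : pass1 l (l - (m : Int) + 1) h' (h' :: (h' :: (List.replicate c h' ++ tl)))
        = (pass1 l (if l - (m : Int) + 1 = l then 0 else l - (m : Int) + 1 + 1) h'
            (h' :: (List.replicate c h' ++ tl))).map (fun bits => 1 :: bits) := by
      simp only [pass1]
      simp [show ¬ (l - (m : Int) + 1 = 0) by omega,
        show (1 : Int) ≤ l - (m : Int) + 1 ∧ l - (m : Int) + 1 ≤ l by omega]
    rw [e1, e2, step]
    by_cases hm1 : m = 1
    · subst hm1
      rw [if_pos (by omega : l - ((1 : Nat) : Int) + 1 = l)]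
      rw [← e2, flat_pass1, if_pos (by omega : (1 : Nat) ≤ c + 1)]
      cases h1 : pass1 l 0 h' (h' :: tl) <;> simp [h1, List.replicate_succ]
    · rw [if_neg (by omega : ¬ (l - (m : Int) + 1 = l))]
      rw [show l - (m : Int) + 1 + 1 = l - ((m - 1 : Nat) : Int) + 1 by omega]
      rw [← e2, ih (m - 1) h' tl (by omega) (by omega) hhd]
      by_cases hmc : m ≤ c + 1
      · rw [if_pos (by omega : m - 1 ≤ c), if_pos hmc]
        cases h1 : pass1 l 0 h' (h' :: tl) <;> simp [h1]
        have hrep : List.replicate m (1 : Int) = 1 :: List.replicate (m - 1) 1 := by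
          cases m with
          | zero => omega
          | succ k => simp [List.replicate_succ]
        rw [hrep]
        have hcc : c + 1 - m = c - (m - 1) := by omega
        simp [hcc]
      · rw [if_neg (by omega : ¬ (m - 1 ≤ c)), if_neg hmc]
        simp


theorem head_expand : ∀ (rs : List (Int × Nat)), (∀ p ∈ rs, 1 ≤ p.2) →
    (expandR rs).head? = headFst rs := by
  intro rs hpos
  cases rs with
  | nil => rfl
  | cons p t =>
    cases p with
    | mk h c =>
      have hc : 1 ≤ c := hpos (h, c) (by simp)
      obtain ⟨c0, rfl⟩ : ∃ c0, c = c0 + 1 := ⟨c - 1, by omega⟩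
      simp [expandR, headFst, List.replicate_succ]

theorem neChain_tail : ∀ (p : Int × Nat) (rs : List (Int × Nat)), neChain (p :: rs) → neChain rs := by
  intro p rs h
  cases rs with
  | nil => simp [neChain]
  | cons q t => exact h.2

theorem canonR_tail {p : Int × Nat} {rs : List (Int × Nat)} (h : canonR (p :: rs)) : canonR rs :=
  ⟨fun q hq => h.1 q (by simp [hq]), neChain_tail p rs h.2⟩

theorem bound_pass1 (l : Int) (hl : 1 ≤ l) : ∀ (rs : List (Int × Nat)), canonR rs →
    ∀ (h now : Int), (∀ x, headFst rs = some x → x ≠ h) →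
    pass1 l 0 now (h :: expandR rs) = gD l (some h) rs := by
  intro rs
  induction rs with
  | nil =>
    intro _ h now _
    show pass1 l 0 now [h] = some []
    simp [pass1]
  | cons p rs ih =>
    cases p with
    | mk h1 c1 =>
      intro hcanon h now hhd
      have hc1 : 1 ≤ c1 := hcanon.1 (h1, c1) (by simp)
      have hne : h1 ≠ h := hhd h1 (by simp [headFst])
      have hcanont : canonR rs := canonR_tail hcanon
      have hhdt : ∀ x, headFst rs = some x → x ≠ h1 := by
        intro x hx
        cases rs with
        | nil => simp [headFst] at hx
        | cons q t =>
          cases q with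
          | mk h2 c2 =>
            simp [headFst] at hx
            subst hx
            exact Ne.symm (hcanon.2.1)
      obtain ⟨c0, rfl⟩ : ∃ c0, c1 = c0 + 1 := ⟨c1 - 1, by omega⟩
      have e2 : List.replicate (c0 + 1) h1 ++ expandR rs = h1 :: (List.replicate c0 h1 ++ expandR rs) := by
        simp [List.replicate_succ]
      show pass1 l 0 now (h :: (List.replicate (c0 + 1) h1 ++ expandR rs)) = _
      rw [e2]
      by_cases hd : h = h1 + 1
      · -- down-slope into the run: ramp starts, first cell marked
        have step : pass1 l 0 now (h :: (h1 :: (List.replicate c0 h1 ++ expandR rs)))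
            = (pass1 l (if (1 : Int) = l then 0 else 2) h1
                (h1 :: (List.replicate c0 h1 ++ expandR rs))).map (fun bits => 1 :: bits) := by
          simp only [pass1]
          simp [hd, hl]
        rw [step]
        by_cases hl1 : (1 : Int) = l
        · rw [if_pos hl1]
          rw [← e2, flat_pass1, ih hcanont h1 h1 hhdt]
          have hblk : blkD l (some h) h1 (c0 + 1) = some (List.replicate 1 1 ++ List.replicate c0 0) := by
            simp only [blkD]
            rw [if_pos hd, if_pos (by omega : l ≤ ((c0 + 1 : Nat) : Int))]
            have h1t : l.toNat = 1 := by omega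
            simp [h1t]
          show _ = gD l (some h) ((h1, c0 + 1) :: rs)
          simp only [gD, hblk]
          cases hg : gD l (some h1) rs <;> simp [hg, List.replicate_one]
        · rw [if_neg hl1]
          rw [show (2 : Int) = l - ((l - 1).toNat : Int) + 1 by omega]
          rw [← e2]
          rw [ramp_pass1 l hl c0 (l - 1).toNat h1 (expandR rs) (by omega) (by omega) ?hd]
          case hd =>
            intro x hx
            rw [head_expand rs hcanont.1] at hx
            exact hhdt x hx
          rw [ih hcanont h1 h1 hhdt]
          show _ = gD l (some h) ((h1, c0 + 1) :: rs)
          by_cases hfit : (l - 1).toNat ≤ c0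
          · rw [if_pos hfit]
            have hblk : blkD l (some h) h1 (c0 + 1)
                = some (List.replicate l.toNat 1 ++ List.replicate (c0 + 1 - l.toNat) 0) := by
              simp only [blkD]
              rw [if_pos hd, if_pos (by omega : l ≤ ((c0 + 1 : Nat) : Int))]
            simp only [gD, hblk]
            cases hg : gD l (some h1) rs <;> simp [hg]
            have hrep : List.replicate l.toNat (1 : Int)
                = 1 :: List.replicate (l - 1).toNat 1 := by
              rw [show l.toNat = (l - 1).toNat + 1 by omega, List.replicate_succ]
            rw [hrep]
            have hcc : c0 - (l - 1).toNat = c0 + 1 - l.toNat := by omega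
            simp [hcc]
            omega
          · rw [if_neg hfit]
            have hblk : blkD l (some h) h1 (c0 + 1) = none := by
              simp only [blkD]
              rw [if_pos hd, if_neg (by omega : ¬ l ≤ ((c0 + 1 : Nat) : Int))]
            simp [gD, hblk]
      · by_cases hg : h > h1 + 1
        · -- gap of two or more downwards: fail
          have step : pass1 l 0 now (h :: (h1 :: (List.replicate c0 h1 ++ expandR rs))) = none := by
            simp only [pass1]
            simp [hd, hg]
          rw [step]
          have hblk : blkD l (some h) h1 (c0 + 1) = none := by
            simp only [blkD]
            rw [if_neg hd, if_pos hg]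
          simp [gD, hblk]
        · -- level or rising: nothing to mark here
          have step : pass1 l 0 now (h :: (h1 :: (List.replicate c0 h1 ++ expandR rs)))
              = (pass1 l 0 now (h1 :: (List.replicate c0 h1 ++ expandR rs))).map (fun bits => 0 :: bits) := by
            simp only [pass1]
            simp [hd, hg]
          rw [step, ← e2, flat_pass1, ih hcanont h1 now hhdt]
          have hblk : blkD l (some h) h1 (c0 + 1) = some (List.replicate (c0 + 1) 0) := by
            simp only [blkD]
            rw [if_neg hd, if_neg hg]
          show _ = gD l (some h) ((h1, c0 + 1) :: rs)
          simp only [gD, hblk]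
          cases hgg : gD l (some h1) rs <;> simp [hgg, List.replicate_succ]

theorem top_pass1 (l : Int) (hl : 1 ≤ l) (rs : List (Int × Nat)) (hc : canonR rs) (hne : rs ≠ []) :
    (pass1 l 0 0 (expandR rs)).map (fun bs => (0 : Int) :: bs) = gD l none rs := by
  cases rs with
  | nil => exact absurd rfl hne
  | cons p rs0 =>
    cases p with
    | mk h1 c1 =>
      have hc1 : 1 ≤ c1 := hc.1 (h1, c1) (by simp)
      obtain ⟨c0, rfl⟩ : ∃ c0, c1 = c0 + 1 := ⟨c1 - 1, by omega⟩
      have hcanont : canonR rs0 := canonR_tail hc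
      have hhdt : ∀ x, headFst rs0 = some x → x ≠ h1 := by
        intro x hx
        cases rs0 with
        | nil => simp [headFst] at hx
        | cons q t =>
          cases q with
          | mk h2 c2 =>
            simp [headFst] at hx
            subst hx
            exact Ne.symm (hc.2.1)
      show (pass1 l 0 0 (List.replicate (c0 + 1) h1 ++ expandR rs0)).map _ = _
      rw [flat_pass1, bound_pass1 l hl rs0 hcanont h1 0 hhdt]
      show _ = gD l none ((h1, c0 + 1) :: rs0)
      have hblk : blkD l none h1 (c0 + 1) = some (List.replicate (c0 + 1) 0) := rfl
      simp only [gD, hblk]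
      cases hg : gD l (some h1) rs0 <;> simp [hg, List.replicate_succ]

def lastFst (prev : Option Int) (xs : List (Int × Nat)) : Option Int :=
  match xs.getLast? with
  | some q => some q.1
  | none => prev

theorem lastFst_cons (prev : Option Int) (x : Int × Nat) (xs : List (Int × Nat)) :
    lastFst prev (x :: xs) = lastFst (some x.1) xs := by
  cases xs with
  | nil => rfl
  | cons y ys =>
    rcases hq : (y :: ys).getLast? with _ | q
    · simp at hq
    · simp [lastFst, List.getLast?_cons_cons, hq]

theorem snoc_gD (l : Int) : ∀ (xs : List (Int × Nat)) (prev : Option Int) (y : Int × Nat),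
    gD l prev (xs ++ [y]) = (gD l prev xs).bind
      (fun m => (blkD l (lastFst prev xs) y.1 y.2).map (fun b => m ++ b)) := by
  intro xs
  induction xs with
  | nil =>
    intro prev y
    cases y with
    | mk hy cy =>
      show gD l prev [(hy, cy)] = _
      simp only [gD, lastFst]
      cases hb : blkD l prev hy cy <;> simp [hb]
  | cons x xs ih =>
    intro prev y
    cases x with
    | mk hx cx =>
      simp only [List.cons_append, gD, lastFst_cons]
      cases hb : blkD l prev hx cx <;> simp [hb]
      rw [ih]
      cases hg : gD l (some hx) xs <;>
        cases hb2 : blkD l (lastFst (some hx) xs) y.1 y.2 <;>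
          simp [hg, hb2]

theorem blk_rev (l : Int) (o : Option Int) (h : Int) (c : Nat) :
    blkD l o h c = (blkU l h c o).map List.reverse := by
  cases o with
  | none => simp [blkD, blkU, List.reverse_replicate]
  | some q =>
    by_cases h1 : q = h + 1
    · by_cases h2 : l ≤ (c : Int) <;>
        simp [blkD, blkU, h1, h2, List.reverse_append, List.reverse_replicate]
    · by_cases h2 : q > h + 1 <;>
        simp [blkD, blkU, h1, h2, List.reverse_replicate]

theorem rev_gD (l : Int) : ∀ rs : List (Int × Nat),
    gD l none rs.reverse = (uGo l rs).map List.reverse := by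
  intro rs
  induction rs with
  | nil => simp [gD, uGo]
  | cons p rs ih =>
    cases p with
    | mk h c =>
      simp only [List.reverse_cons]
      rw [snoc_gD]
      have hlf : lastFst none rs.reverse = headFst rs := by
        cases rs with
        | nil => rfl
        | cons q t =>
          simp [lastFst, getLast?_reverse', headFst]
      rw [hlf, ih, blk_rev]
      show _ = (uGo l ((h, c) :: rs)).map List.reverse
      simp only [uGo]
      cases hbu : blkU l h c (headFst rs) <;> cases hu : uGo l rs <;>
        simp [hbu, hu, List.reverse_append]


-- ===== zip/overlap arithmetic =====
theorem all_zip_left_zero : ∀ (c : Nat) (b2 : List Int), (∀ x ∈ b2, x = 0 ∨ x = 1) →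
    (List.zipWith (· + ·) (List.replicate c (0 : Int)) b2).all (fun r => decide (r ≤ 1)) = true := by
  intro c
  induction c with
  | zero => intro b2 _; simp
  | succ c ih =>
    intro b2 hb2
    cases b2 with
    | nil => simp
    | cons x t =>
      have hx := hb2 x (by simp)
      simp only [List.replicate_succ, List.zipWith_cons_cons, List.all_cons]
      rw [ih t (fun y hy => hb2 y (by simp [hy]))]
      rcases hx with h | h <;> simp [h]

theorem all_zip_right_zero : ∀ (c : Nat) (b1 : List Int), (∀ x ∈ b1, x = 0 ∨ x = 1) →
    (List.zipWith (· + ·) b1 (List.replicate c (0 : Int))).all (fun r => decide (r ≤ 1)) = true := by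
  intro c
  induction c with
  | zero => intro b1 _; simp
  | succ c ih =>
    intro b1 hb1
    cases b1 with
    | nil => simp
    | cons x t =>
      have hx := hb1 x (by simp)
      simp only [List.replicate_succ, List.zipWith_cons_cons, List.all_cons]
      rw [ih t (fun y hy => hb1 y (by simp [hy]))]
      rcases hx with h | h <;> simp [h]

theorem zip_replicate' (f : Int → Int → Int) : ∀ (n : Nat) (a b : Int),
    List.zipWith f (List.replicate n a) (List.replicate n b) = List.replicate n (f a b) := by
  intro n
  induction n with
  | zero => intro a b; simp
  | succ n ih => intro a b; simp [List.replicate_succ, ih]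

theorem zip_overlap (L : Nat) (c : Nat) (hL : 1 ≤ L) (hLc : L ≤ c) :
    ((List.zipWith (· + ·) (List.replicate L (1 : Int) ++ List.replicate (c - L) 0)
        (List.replicate (c - L) (0 : Int) ++ List.replicate L 1)).all
      (fun r => decide (r ≤ 1))) = decide (2 * L ≤ c) := by
  by_cases h2 : 2 * L ≤ c
  · have e1 : List.replicate (c - L) (0 : Int) = List.replicate (c - 2 * L) 0 ++ List.replicate L 0 := by
      rw [List.replicate_append_replicate]
      congr 1
      omega
    have e2 : List.replicate (c - L) (0 : Int) = List.replicate L 0 ++ List.replicate (c - 2 * L) 0 := by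
      rw [List.replicate_append_replicate]
      congr 1
      omega
    rw [show (List.replicate L (1:Int) ++ List.replicate (c-L) 0) =
        List.replicate L (1:Int) ++ (List.replicate (c - 2*L) 0 ++ List.replicate L 0) from by rw [← e1],
      show (List.replicate (c-L) (0:Int) ++ List.replicate L 1) =
        List.replicate L (0:Int) ++ (List.replicate (c - 2*L) 0 ++ List.replicate L 1) from by
          rw [e2, List.append_assoc]]
    rw [List.zipWith_append (by simp)]
    rw [List.zipWith_append (by simp)]
    simp [zip_replicate', List.all_append, List.all_replicate, h2]
  · have eL2 : List.replicate L (1 : Int)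
        = List.replicate (L - (c - L)) 1 ++ List.replicate (c - L) 1 := by
      rw [List.replicate_append_replicate]; congr 1; omega
    have eL1 : List.replicate L (1 : Int)
        = List.replicate (c - L) 1 ++ List.replicate (L - (c - L)) 1 := by
      rw [List.replicate_append_replicate]; congr 1; omega
    rw [show (List.replicate L (1:Int) ++ List.replicate (c-L) 0) =
        List.replicate (c-L) (1:Int) ++ (List.replicate (L-(c-L)) 1 ++ List.replicate (c-L) 0) from by
          rw [← List.append_assoc, ← eL1],
      show (List.replicate (c-L) (0:Int) ++ List.replicate L 1) =
        List.replicate (c-L) (0:Int) ++ (List.replicate (L-(c-L)) 1 ++ List.replicate (c-L) 1) from by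
          rw [eL2]]
    rw [List.zipWith_append (by simp)]
    rw [List.zipWith_append (by simp)]
    simp [zip_replicate', List.all_append, List.all_replicate, h2]
    intro h
    omega

-- ===== block facts =====
theorem blkD_mem (l : Int) (o : Option Int) (h : Int) (c : Nat) {b : List Int}
    (hb : blkD l o h c = some b) : ∀ x ∈ b, x = 0 ∨ x = 1 := by
  intro x hx
  cases o with
  | none =>
    simp [blkD] at hb
    subst hb
    simp at hx
    left; exact hx.2
  | some q =>
    by_cases h1 : q = h + 1
    · by_cases h2 : l ≤ (c : Int)
      · simp [blkD, h1, h2] at hb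
        subst hb
        simp at hx
        rcases hx with ⟨_, hx⟩ | ⟨_, hx⟩
        · right; exact hx
        · left; exact hx
      · simp [blkD, h1, h2] at hb
    · by_cases h2 : q > h + 1
      · simp [blkD, h1, h2] at hb
      · simp [blkD, h1, h2] at hb
        subst hb
        simp at hx
        left; exact hx.2

theorem blkU_mem (l : Int) (h : Int) (c : Nat) (o : Option Int) {b : List Int}
    (hb : blkU l h c o = some b) : ∀ x ∈ b, x = 0 ∨ x = 1 := by
  have hrev := blk_rev l o h c
  rw [hb] at hrev
  intro x hx
  exact blkD_mem l o h c hrev x (by simp [hx])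

theorem blkD_length (l : Int) (hl : 1 ≤ l) (o : Option Int) (h : Int) (c : Nat) {b : List Int}
    (hb : blkD l o h c = some b) : b.length = c := by
  cases o with
  | none => simp [blkD] at hb; subst hb; simp
  | some q =>
    by_cases h1 : q = h + 1
    · by_cases h2 : l ≤ (c : Int)
      · simp [blkD, h1, h2] at hb
        subst hb
        simp
        omega
      · simp [blkD, h1, h2] at hb
    · by_cases h2 : q > h + 1
      · simp [blkD, h1, h2] at hb
      · simp [blkD, h1, h2] at hb; subst hb; simp

theorem blkU_length (l : Int) (hl : 1 ≤ l) (h : Int) (c : Nat) (o : Option Int) {b : List Int}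
    (hb : blkU l h c o = some b) : b.length = c := by
  have hrev := blk_rev l o h c
  rw [hb] at hrev
  have := blkD_length l hl o h c hrev
  simpa using this

-- ===== Bool plumbing for B's per-node conditions =====
theorem if_false_and (cond : Prop) [Decidable cond] (x : Bool) :
    (if cond then false else x) = (!(decide cond) && x) := by
  split_ifs with hc <;> simp [hc]

def adjHead (x : Int) (t : List (Int × Int)) : Bool :=
  match t.head? with
  | some q => ((x - q.1).natAbs == 1)
  | none => true

def needD (o : Option Int) (h : Int) : Int :=
  match o with
  | some p => if p > h then 1 else 0
  | none => 0

def needN (t : List (Int × Int)) (h : Int) : Int :=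
  match t.head? with
  | some q => if q.1 > h then 1 else 0
  | none => 0

theorem adjOk_cons (x : Int) (cI : Int) (t : List (Int × Int)) :
    adjOk ((x, cI) :: t) = (adjHead x t && adjOk t) := by
  cases t with
  | nil => simp [adjOk, adjHead]
  | cons y t2 => simp [adjOk, adjHead]

theorem needOk_cons (l : Int) (prev : Option Int) (h cI : Int) (t : List (Int × Int)) :
    needOk l prev ((h, cI) :: t)
      = (!(decide ((needD prev h + needN t h) * l > cI)) && needOk l (some h) t) := by
  show (if (needD prev h + needN t h) * l > cI then false else needOk l (some h) t) = _
  rw [if_false_and]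

def prevBound : Option Int → List (Int × Nat) → Prop
  | some p, (h, _) :: _ => p ≤ h + 1
  | _, _ => True

theorem combineA_nil (l : Int) (prev : Option Int) : combineA l prev [] = true := by
  simp [combineA, gD, uGo]

theorem combineA_split (l : Int) (hl : 1 ≤ l) (prev : Option Int) (h : Int) (c : Nat)
    (rs : List (Int × Nat)) {b1 b2 : List Int}
    (hbd : blkD l prev h c = some b1) (hbu : blkU l h c (headFst rs) = some b2) :
    combineA l prev ((h, c) :: rs)
      = (((List.zipWith (· + ·) b1 b2).all (fun r => decide (r ≤ 1))) && combineA l (some h) rs) := by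
  have hlen : b1.length = b2.length := by
    rw [blkD_length l hl prev h c hbd, blkU_length l hl h c (headFst rs) hbu]
  rcases hgr : gD l (some h) rs with _ | m1 <;> rcases hur : uGo l rs with _ | m2 <;>
    simp [combineA, gD, uGo, hbd, hbu, hgr, hur]
  rw [List.zipWith_append hlen, List.all_append]

theorem combineA_none_d (l : Int) (prev : Option Int) (h : Int) (c : Nat)
    (rs : List (Int × Nat)) (hbd : blkD l prev h c = none) :
    combineA l prev ((h, c) :: rs) = false := by
  simp [combineA, gD, hbd]

theorem combineA_none_u (l : Int) (prev : Option Int) (h : Int) (c : Nat)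
    (rs : List (Int × Nat)) (hbu : blkU l h c (headFst rs) = none) :
    combineA l prev ((h, c) :: rs) = false := by
  rcases hgd : (blkD l prev h c).bind
      (fun b => (gD l (some h) rs).map (fun m => b ++ m)) with _ | m1 <;>
    simp [combineA, gD, uGo, hbu, hgd]

theorem main_eq (l : Int) (hl : 1 ≤ l) : ∀ (rs : List (Int × Nat)) (prev : Option Int),
    canonR rs → prevBound prev rs →
    combineA l prev rs = (adjOk (castRs rs) && needOk l prev (castRs rs)) := by
  intro rs
  induction rs with
  | nil => intro prev _ _; simp [combineA_nil, adjOk, castRs, needOk]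
  | cons p rs ih =>
    cases p with
    | mk h c =>
      intro prev hcanon hpb
      have hcanont : canonR rs := canonR_tail hcanon
      have hc1 : 1 ≤ c := hcanon.1 (h, c) (by simp)
      have hcast : castRs ((h, c) :: rs) = (h, (c : Int)) :: castRs rs := rfl
      rw [hcast, adjOk_cons, needOk_cons]
      cases rs with
      | nil =>
        have hbu : blkU l h c (headFst ([] : List (Int × Nat))) = some (List.replicate c 0) := rfl
        have hA0 : adjHead h (castRs []) = true := rfl
        have hnv : needN (castRs []) h = 0 := rfl
        rw [hA0, hnv]
        cases prev with
        | none =>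
          have hbd : blkD l none h c = some (List.replicate c 0) := rfl
          rw [combineA_split l hl none h c [] hbd hbu]
          rw [all_zip_left_zero c _ (blkU_mem l h c none hbu)]
          have hdv : needD none h = 0 := rfl
          rw [hdv, show decide (((0 : Int) + 0) * l > (c : Nat)) = false from by simp <;> omega]
          simp [combineA_nil, adjOk, needOk, castRs]
        | some p =>
          have hp : p ≤ h + 1 := hpb
          by_cases hp1 : p = h + 1
          · have hdv : needD (some p) h = 1 := by
              simp only [needD]
              rw [if_pos (by omega : p > h)]
            rw [hdv]
            by_cases hp2 : l ≤ (c : Int)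
            · have hbd : blkD l (some p) h c
                  = some (List.replicate l.toNat 1 ++ List.replicate (c - l.toNat) 0) := by
                simp only [blkD]
                rw [if_pos hp1, if_pos hp2]
              rw [combineA_split l hl (some p) h c [] hbd hbu]
              rw [all_zip_right_zero c _ (blkD_mem l (some p) h c hbd)]
              rw [show decide (((1 : Int) + 0) * l > (c : Nat)) = false from by simp <;> omega]
              simp [combineA_nil, adjOk, needOk, castRs]
            · have hbd : blkD l (some p) h c = none := by
                simp only [blkD]
                rw [if_pos hp1, if_neg hp2]
              rw [combineA_none_d l (some p) h c [] hbd]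
              rw [show decide (((1 : Int) + 0) * l > (c : Nat)) = true from by simp <;> omega]
              simp
          · have hdv : needD (some p) h = 0 := by
              simp only [needD]
              rw [if_neg (by omega : ¬ p > h)]
            rw [hdv]
            have hbd : blkD l (some p) h c = some (List.replicate c 0) := by
              simp only [blkD]
              rw [if_neg hp1, if_neg (by omega : ¬ p > h + 1)]
            rw [combineA_split l hl (some p) h c [] hbd hbu]
            rw [all_zip_left_zero c _ (blkU_mem l h c none hbu)]
            rw [show decide (((0 : Int) + 0) * l > (c : Nat)) = false from by simp <;> omega]
            simp [combineA_nil, adjOk, needOk, castRs]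
      | cons q t =>
        cases q with
        | mk h2 c2 =>
          have hne2 : h ≠ h2 := hcanon.2.1
          have hhead : headFst ((h2, c2) :: t) = some h2 := rfl
          have hA0eq : adjHead h (castRs ((h2, c2) :: t)) = ((h - h2).natAbs == 1) := rfl
          have hnveq : needN (castRs ((h2, c2) :: t)) h = if h2 > h then 1 else 0 := rfl
          rw [hA0eq, hnveq]
          by_cases hq2 : h2 > h + 1
          · -- rising gap: blkU fails, adjOk fails
            have hbu : blkU l h c (some h2) = none := by
              simp only [blkU]
              rw [if_neg (by omega : ¬ h2 = h + 1), if_pos hq2]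
            rw [combineA_none_u l prev h c ((h2, c2) :: t) (by rw [hhead]; exact hbu)]
            rw [show ((h - h2).natAbs == 1) = false from by simp <;> omega]
            simp
          · by_cases hgap : h > h2 + 1
            · -- falling gap: gD fails on the next node, adjOk fails
              have hbd2 : blkD l (some h) h2 c2 = none := by
                simp only [blkD]
                rw [if_neg (by omega : ¬ h = h2 + 1), if_pos hgap]
              have hgr : gD l (some h) ((h2, c2) :: t) = none := by
                simp [gD, hbd2]
              have hL : combineA l prev ((h, c) :: (h2, c2) :: t) = false := by
                rcases hbd : blkD l prev h c with _ | b1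
                · exact combineA_none_d l prev h c _ hbd
                · rcases hbu : blkU l h c (headFst ((h2, c2) :: t)) with _ | b2
                  · exact combineA_none_u l prev h c _ hbu
                  · rw [combineA_split l hl prev h c _ hbd hbu]
                    simp [combineA, hgr]
              rw [hL]
              rw [show ((h - h2).natAbs == 1) = false from by simp <;> omega]
              simp
            · -- adjacent heights differ by exactly one
              have hA0 : ((h - h2).natAbs == 1) = true := by
                simp
                omega
              rw [hA0]
              have hrec := ih (some h) hcanont (by show h ≤ h2 + 1; omega)
              by_cases hue : h2 = h + 1
              · rw [show (if h2 > h then (1 : Int) else 0) = 1 from by rw [if_pos (by omega)]]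
                by_cases hfit : l ≤ (c : Int)
                · have hbu : blkU l h c (some h2)
                      = some (List.replicate (c - l.toNat) 0 ++ List.replicate l.toNat 1) := by
                    simp only [blkU]
                    rw [if_pos hue, if_pos hfit]
                  have hbumem := blkU_mem l h c (some h2) hbu
                  cases prev with
                  | none =>
                    have hbd : blkD l none h c = some (List.replicate c 0) := rfl
                    rw [combineA_split l hl none h c _ hbd (by rw [hhead]; exact hbu)]
                    rw [all_zip_left_zero c _ hbumem]
                    rw [show needD none h = 0 from rfl]
                    rw [show decide (((0 : Int) + 1) * l > (c : Nat)) = false from by simp <;> omega]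
                    rw [hrec]
                    cases hb1 : adjOk (castRs ((h2, c2) :: t)) <;>
                      cases hb2 : needOk l (some h) (castRs ((h2, c2) :: t)) <;> simp
                  | some p =>
                    have hp : p ≤ h + 1 := hpb
                    by_cases hp1 : p = h + 1
                    · -- both ramps on this run: the overlap test decides
                      have hbd : blkD l (some p) h c
                          = some (List.replicate l.toNat 1 ++ List.replicate (c - l.toNat) 0) := by
                        simp only [blkD]
                        rw [if_pos hp1, if_pos hfit]
                      rw [combineA_split l hl (some p) h c _ hbd (by rw [hhead]; exact hbu)]
                      rw [zip_overlap l.toNat c (by omega) (by omega)]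
                      rw [show needD (some p) h = 1 from by
                        simp only [needD]; rw [if_pos (by omega : p > h)]]
                      rw [show decide (((1 : Int) + 1) * l > (c : Nat)) = !(decide (2 * l.toNat ≤ c)) from by
                        by_cases hh : 2 * l ≤ (c : Int)
                        · rw [show decide (2 * l.toNat ≤ c) = true from by simp <;> omega]
                          simp
                          omega
                        · rw [show decide (2 * l.toNat ≤ c) = false from by simp <;> omega]
                          simp
                          omega]
                      rw [hrec]
                      cases hdec : decide (2 * l.toNat ≤ c) <;>
                        cases hb1 : adjOk (castRs ((h2, c2) :: t)) <;>
                          cases hb2 : needOk l (some h) (castRs ((h2, c2) :: t)) <;> simp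
                    · have hbd : blkD l (some p) h c = some (List.replicate c 0) := by
                        simp only [blkD]
                        rw [if_neg hp1, if_neg (by omega : ¬ p > h + 1)]
                      rw [combineA_split l hl (some p) h c _ hbd (by rw [hhead]; exact hbu)]
                      rw [all_zip_left_zero c _ hbumem]
                      rw [show needD (some p) h = 0 from by
                        simp only [needD]; rw [if_neg (by omega : ¬ p > h)]]
                      rw [show decide (((0 : Int) + 1) * l > (c : Nat)) = false from by simp <;> omega]
                      rw [hrec]
                      simp
                · -- up-ramp does not fit: both sides fail
                  have hbu : blkU l h c (some h2) = none := by
                    simp only [blkU]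
                    rw [if_pos hue, if_neg hfit]
                  rw [combineA_none_u l prev h c _ (by rw [hhead]; exact hbu)]
                  cases prev with
                  | none =>
                    rw [show needD none h = 0 from rfl]
                    rw [show decide (((0 : Int) + 1) * l > (c : Nat)) = true from by simp <;> omega]
                    simp
                  | some p =>
                    have hp : p ≤ h + 1 := hpb
                    by_cases hpgt : p > h
                    · rw [show needD (some p) h = 1 from by simp only [needD]; rw [if_pos hpgt]]
                      rw [show decide (((1 : Int) + 1) * l > (c : Nat)) = true from by simp <;> omega]
                      simp
                    · rw [show needD (some p) h = 0 from by simp only [needD]; rw [if_neg hpgt]]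
                      rw [show decide (((0 : Int) + 1) * l > (c : Nat)) = true from by simp <;> omega]
                      simp
              · -- next run lower by one: no up-ramp on this run
                have hue2 : h2 = h - 1 := by omega
                rw [show (if h2 > h then (1 : Int) else 0) = 0 from by rw [if_neg (by omega)]]
                have hbu : blkU l h c (some h2) = some (List.replicate c 0) := by
                  simp only [blkU]
                  rw [if_neg hue, if_neg (by omega : ¬ h2 > h + 1)]
                cases prev with
                | none =>
                  have hbd : blkD l none h c = some (List.replicate c 0) := rfl
                  rw [combineA_split l hl none h c _ hbd (by rw [hhead]; exact hbu)]
                  rw [all_zip_left_zero c _ (blkU_mem l h c (some h2) hbu)]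
                  rw [show needD none h = 0 from rfl]
                  rw [show decide (((0 : Int) + 0) * l > (c : Nat)) = false from by simp <;> omega]
                  rw [hrec]
                  simp
                | some p =>
                  have hp : p ≤ h + 1 := hpb
                  by_cases hp1 : p = h + 1
                  · by_cases hfit2 : l ≤ (c : Int)
                    · have hbd : blkD l (some p) h c
                          = some (List.replicate l.toNat 1 ++ List.replicate (c - l.toNat) 0) := by
                        simp only [blkD]
                        rw [if_pos hp1, if_pos hfit2]
                      rw [combineA_split l hl (some p) h c _ hbd (by rw [hhead]; exact hbu)]
                      rw [all_zip_right_zero c _ (blkD_mem l (some p) h c hbd)]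
                      rw [show needD (some p) h = 1 from by
                        simp only [needD]; rw [if_pos (by omega : p > h)]]
                      rw [show decide (((1 : Int) + 0) * l > (c : Nat)) = false from by simp <;> omega]
                      rw [hrec]
                      simp
                    · have hbd : blkD l (some p) h c = none := by
                        simp only [blkD]
                        rw [if_pos hp1, if_neg hfit2]
                      rw [combineA_none_d l (some p) h c _ hbd]
                      rw [show needD (some p) h = 1 from by
                        simp only [needD]; rw [if_pos (by omega : p > h)]]
                      rw [show decide (((1 : Int) + 0) * l > (c : Nat)) = true from by simp <;> omega]
                      simp
                  · have hbd : blkD l (some p) h c = some (List.replicate c 0) := by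
                      simp only [blkD]
                      rw [if_neg hp1, if_neg (by omega : ¬ p > h + 1)]
                    rw [combineA_split l hl (some p) h c _ hbd (by rw [hhead]; exact hbu)]
                    rw [all_zip_left_zero c _ (blkU_mem l h c (some h2) hbu)]
                    rw [show needD (some p) h = 0 from by
                      simp only [needD]; rw [if_neg (by omega : ¬ p > h)]]
                    rw [show decide (((0 : Int) + 0) * l > (c : Nat)) = false from by simp <;> omega]
                    rw [hrec]
                    simp


theorem prevBound_none (rs : List (Int × Nat)) : prevBound none rs := by
  cases rs with
  | nil => trivial
  | cons p t => cases p; trivial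

theorem roadok_eq_B (l : Int) (road : List Int) :
    roadok l road = (adjOk (castRs (rleN road)) && needOk l none (castRs (rleN road))) := by
  simp [roadok, runsOf_eq]

theorem roadcheck_eq_roadok (n l : Int) (hl : 1 ≤ l) (road : List Int) :
    roadcheck n l road = roadok l road := by
  have hcanon := canon_rleN road
  have hexp := expand_rleN road
  rcases hrs : rleN road with _ | ⟨⟨h1, c1⟩, rs0⟩
  · have hroad : road = [] := by rw [← hexp, hrs]; rfl
    subst hroad
    rfl
  · rw [hrs] at hcanon hexp
    have hne : ((h1, c1) :: rs0 : List (Int × Nat)) ≠ [] := by simp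
    have hA : (pass1 l 0 0 road).map (fun bs => (0 : Int) :: bs) = gD l none ((h1, c1) :: rs0) := by
      rw [← hexp]
      exact top_pass1 l hl _ hcanon hne
    have hB : (pass1 l 0 0 road.reverse).map (fun bs => (0 : Int) :: bs)
        = (uGo l ((h1, c1) :: rs0)).map List.reverse := by
      have hcr : canonR ((h1, c1) :: rs0).reverse := canonR_reverse hcanon
      have hner : (((h1, c1) :: rs0) : List (Int × Nat)).reverse ≠ [] := by simp
      have hexpr : expandR ((h1, c1) :: rs0).reverse = road.reverse := by
        rw [expandR_reverse, hexp]
      rw [← hexpr, top_pass1 l hl _ hcr hner, rev_gD]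
    have hcomb : roadcheck n l road = combineA l none ((h1, c1) :: rs0) := by
      simp only [roadcheck]
      rw [pass2_eq_pass1]
      rcases hp1 : pass1 l 0 0 road with _ | bits1
      · rw [hp1] at hA
        simp only [Option.map_none] at hA
        simp [combineA, ← hA]
      · rw [hp1] at hA
        simp only [Option.map_some] at hA
        rcases hp2 : pass1 l 0 0 road.reverse with _ | bits2
        · rw [hp2] at hB
          simp only [Option.map_none] at hB
          rcases hu0 : uGo l ((h1, c1) :: rs0) with _ | mu
          · simp [combineA, hu0, ← hA]
          · rw [hu0] at hB
            simp at hB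
        · rw [hp2] at hB
          simp only [Option.map_some] at hB
          rcases hu0 : uGo l ((h1, c1) :: rs0) with _ | mu
          · rw [hu0] at hB
            simp at hB
          · rw [hu0] at hB
            simp only [Option.map_some, Option.some.injEq] at hB
            have hmu : mu = ((0 : Int) :: bits2).reverse := by
              rw [hB]
              simp
            simp [combineA, ← hA, hu0, hmu, List.reverse_cons]
    rw [hcomb, main_eq l hl _ none hcanon (prevBound_none _), roadok_eq_B, hrs]

theorem check_eq_full (n l : Int) (hl : 1 ≤ l) (roads : List (List Int)) :
    check n l roads = check_alt n l roads := by
  have hrow : ∀ (road : List Int), roadcheck n l road = roadok l road :=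
    roadcheck_eq_roadok n l hl
  have h2 : ∀ i : Int, (PySem.List.pyRange 0 n 1).foldl
        (fun rd j => rd ++ [(PySem.List.pyGet? ((PySem.List.pyGet? roads j).getD []) i).getD 0]) []
      = (PySem.List.pyRange 0 n 1).map
        (fun j => (PySem.List.pyGet? ((PySem.List.pyGet? roads j).getD []) i).getD 0) := by
    intro i
    rw [foldl_append_map]
    simp
  simp only [check, check_alt]
  have h1 : (fun (acc : Int) (i : Int) =>
      if roadcheck n l ((PySem.List.pyGet? roads i).getD []) then acc + 1 else acc)
      = (fun (acc : Int) (i : Int) =>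
      if roadok l ((PySem.List.pyGet? roads i).getD []) then acc + 1 else acc) := by
    funext acc i
    rw [hrow]
  rw [h1]
  have h3 : (fun (acc : Int) (i : Int) =>
      if roadcheck n l ((PySem.List.pyRange 0 n 1).foldl
        (fun rd j => rd ++ [(PySem.List.pyGet? ((PySem.List.pyGet? roads j).getD []) i).getD 0]) [])
      then acc + 1 else acc)
      = (fun (acc : Int) (i : Int) =>
      if roadok l ((PySem.List.pyRange 0 n 1).map
        (fun j => (PySem.List.pyGet? ((PySem.List.pyGet? roads j).getD []) i).getD 0))
      then acc + 1 else acc) := by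
    funext acc i
    rw [h2 i, hrow]
  rw [h3]

-- ===== VERDICT (by name: the statement is the Claim_ definition above) =====
theorem check_spec : Claim_equal_check := by
  intro n l roads _ hpre
  unfold Spec_check
  exact check_eq_full n l hpre.1 roads
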